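-- pv_equiv track=rewrite | github.com/GreenteaHT/Coding_Test | Programmers/LV2/[1차]_뉴스_클러스터링.py | gen_wrd_dic
-- ===== SOURCE A (Python) =====
-- def gen_wrd_dic(str):
--     str = str.upper()
--     str_dic = {}
--     for i in range(len(str) - 1):
--         if 'A' <= str[i] <= 'Z' and 'A' <= str[i + 1] <= 'Z':
--             if str[i:i+2] in str_dic:
--                 str_dic[str[i:i+2]] += 1
--             else:
--                 str_dic[str[i:i+2]] = 1
--     return str_dic
-- ===== SOURCE B (Python) =====
-- def gen_wrd_dic(str):
--     s = str.upper()
--     pairs = [a + b for a, b in zip(s, s[1:]) if 'A' <= a <= 'Z' and 'A' <= b <= 'Z']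
--     return {bg: pairs.count(bg) for bg in dict.fromkeys(pairs)}
-- ===== Notes on version B (the rewrite author's own statement) =====
-- stated objective: alternative
-- what changed: Replaces the index-by-index scan with a manually incremented dict by a pairwise zip extraction of valid bigrams followed by an ordered dedup and a per-key count tally.
import Mathlib
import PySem

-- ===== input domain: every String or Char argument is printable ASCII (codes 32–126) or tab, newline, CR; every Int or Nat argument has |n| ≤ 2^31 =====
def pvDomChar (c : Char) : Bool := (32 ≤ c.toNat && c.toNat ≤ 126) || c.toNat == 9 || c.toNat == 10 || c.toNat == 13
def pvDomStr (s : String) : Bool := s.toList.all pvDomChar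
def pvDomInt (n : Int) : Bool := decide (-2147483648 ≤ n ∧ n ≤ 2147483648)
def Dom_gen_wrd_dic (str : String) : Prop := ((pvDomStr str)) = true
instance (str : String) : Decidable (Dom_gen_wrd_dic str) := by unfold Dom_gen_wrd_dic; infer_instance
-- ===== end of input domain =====

-- B replaces A's index loop with manual dict increments by a pairwise zip extraction
-- of the valid bigrams followed by an ordered dedup with a per-key count (alternative
-- decomposition, not claimed faster).

-- ===== PORT A =====
def gen_wrd_dic (str : String) : List (String × Int) :=
  let s := PySem.Chars.upper str.toList
  let d := (PySem.List.pyRange 0 ((s.length : Int) - 1) 1).foldl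
    (fun (d : PySem.Dict String Int) i =>
      let a := PySem.List.pyGetD s i ' '
      let b := PySem.List.pyGetD s (i + 1) ' '
      if 'A' ≤ a ∧ a ≤ 'Z' ∧ 'A' ≤ b ∧ b ≤ 'Z' then
        let bg := String.ofList (PySem.List.slice s (some i) (some (i + 2)))
        if d.contains bg then d.insert bg (d.getD bg 0 + 1) else d.insert bg 1
      else d)
    PySem.Dict.empty
  d.items

-- ===== PORT B =====
def gen_wrd_dic_alt (str : String) : List (String × Int) :=
  let s := PySem.Chars.upper str.toList
  let pairs := ((s.zip (s.drop 1)).filter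
      (fun p => decide ('A' ≤ p.1 ∧ p.1 ≤ 'Z' ∧ 'A' ≤ p.2 ∧ p.2 ≤ 'Z'))).map
      (fun p => String.ofList [p.1, p.2])
  (PySem.List.dedup pairs).map (fun bg => (bg, (PySem.List.count pairs bg : Int)))

-- ===== PRECONDITION & SPEC =====
def Spec_gen_wrd_dic (str : String) (out : List (String × Int)) : Prop := out = gen_wrd_dic_alt str
instance (str : String) (out : List (String × Int)) : Decidable (Spec_gen_wrd_dic str out) := by unfold Spec_gen_wrd_dic; infer_instance

-- ===== CLAIM (what is proved, stated in full; the proofs are below) =====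
def Claim_equal_gen_wrd_dic : Prop := ∀ (str : String), Dom_gen_wrd_dic str → Spec_gen_wrd_dic str (gen_wrd_dic str)

-- ===== LEMMAS AND PROOFS =====

-- s[i:i+2] at an in-range position is the two-element list of the adjacent characters.
theorem pvTakeTwoDrop : ∀ (s : List Char) (i : Nat), i + 1 < s.length →
    (s.drop i).take 2 = [s.getD i ' ', s.getD (i + 1) ' ']
  | _ :: _ :: _, 0, _ => rfl
  | a :: b :: t, (j+1), h => by
    simpa using pvTakeTwoDrop (b :: t) j (by simpa using h)

-- the list of adjacent index pairs IS zip s (s.drop 1)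
theorem pvAdjZip : ∀ (s : List Char),
    (List.range (s.length - 1)).map (fun i => (s.getD i ' ', s.getD (i + 1) ' ')) =
      s.zip (s.drop 1)
  | [] => rfl
  | [_] => rfl
  | a :: b :: t => by
    have ih := pvAdjZip (b :: t)
    simp only [List.length_cons, Nat.add_sub_cancel, List.getD_cons_succ] at ih ⊢
    rw [List.range_succ_eq_map, List.map_cons, List.map_map]
    simp only [List.getD_cons_zero, Function.comp_def, Nat.succ_eq_add_one,
      List.getD_cons_succ]
    rw [ih]
    simp [List.zip]

-- a fold over indices of adjacent pairs is a fold over zip s (s.drop 1)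
theorem pvFoldPair {β : Type} (G : β → Char × Char → β) (s : List Char) (init : β) :
    (List.range (s.length - 1)).foldl
        (fun d i => G d (s.getD i ' ', s.getD (i + 1) ' ')) init =
      (s.zip (s.drop 1)).foldl G init := by
  rw [← pvAdjZip, List.foldl_map]

-- A's manual if/else increment is Dict.modify with default 0
theorem pvUpdEqModify (d : PySem.Dict String Int) (k : String) :
    (if d.contains k then d.insert k (d.getD k 0 + 1) else d.insert k 1) =
      d.modify k 0 (· + 1) := by
  unfold PySem.Dict.modify
  by_cases h : d.contains k
  · simp [h]
  · simp only [Bool.not_eq_true] at h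
    simp [h, PySem.Dict.getD_of_not_contains d 0 h]

-- A's whole loop builds Counter(pairs)
theorem pvFoldMk (l : List (Char × Char)) (init : PySem.Dict String Int) :
    l.foldl (fun d p => PySem.Dict.modify d (String.ofList [p.1, p.2]) 0 (· + 1)) init
      = (l.map (fun p => String.ofList [p.1, p.2])).foldl
          (fun d k => PySem.Dict.modify d k 0 (· + 1)) init := by
  rw [List.foldl_map]

theorem pvMain (s : List Char) :
    ((PySem.List.pyRange 0 ((s.length : Int) - 1) 1).foldl
      (fun (d : PySem.Dict String Int) i =>
        let a := PySem.List.pyGetD s i ' '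
        let b := PySem.List.pyGetD s (i + 1) ' '
        if 'A' ≤ a ∧ a ≤ 'Z' ∧ 'A' ≤ b ∧ b ≤ 'Z' then
          let bg := String.ofList (PySem.List.slice s (some i) (some (i + 2)))
          if d.contains bg then d.insert bg (d.getD bg 0 + 1) else d.insert bg 1
        else d)
      PySem.Dict.empty) =
    PySem.Dict.counter (((s.zip (s.drop 1)).filter
        (fun p => decide ('A' ≤ p.1 ∧ p.1 ≤ 'Z' ∧ 'A' ≤ p.2 ∧ p.2 ≤ 'Z'))).map
        (fun p => String.ofList [p.1, p.2])) := by
  cases s with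
  | nil => decide
  | cons c t =>
    set s := c :: t with hs
    have hlen : (s.length : Int) - 1 = ((s.length - 1 : Nat) : Int) := by
      simp only [hs, List.length_cons, Nat.add_sub_cancel]
      push_cast; ring
    rw [hlen, PySem.List.pyRange_zero_natCast, List.foldl_map]
    have hcongr : ∀ (d : PySem.Dict String Int), ∀ i ∈ List.range (s.length - 1),
        (fun (d : PySem.Dict String Int) (i : Int) =>
          let a := PySem.List.pyGetD s i ' '
          let b := PySem.List.pyGetD s (i + 1) ' '
          if 'A' ≤ a ∧ a ≤ 'Z' ∧ 'A' ≤ b ∧ b ≤ 'Z' then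
            let bg := String.ofList (PySem.List.slice s (some i) (some (i + 2)))
            if d.contains bg then d.insert bg (d.getD bg 0 + 1) else d.insert bg 1
          else d) d ((i : Nat) : Int)
        = (fun (d : PySem.Dict String Int) (p : Char × Char) =>
            if 'A' ≤ p.1 ∧ p.1 ≤ 'Z' ∧ 'A' ≤ p.2 ∧ p.2 ≤ 'Z' then
              PySem.Dict.modify d (String.ofList [p.1, p.2]) 0 (· + 1) else d)
            d (s.getD i ' ', s.getD (i + 1) ' ') := by
      intro d i hi
      have hi' : i + 1 < s.length := by
        have := List.mem_range.mp hi; omega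
      have h1 : ((i : Int) + 1) = ((i + 1 : Nat) : Int) := by push_cast; ring
      have h2 : ((i : Int) + 2) = ((i : Int) + ((2 : Nat) : Int)) := by norm_num
      simp only [h1, h2, PySem.List.pyGetD_natCast, PySem.List.slice_natCast_add,
        pvTakeTwoDrop s i hi', pvUpdEqModify]
    rw [PySem.List.foldl_congr_mem _ _ _ _ hcongr,
      pvFoldPair (G := fun (d : PySem.Dict String Int) (p : Char × Char) =>
        if 'A' ≤ p.1 ∧ p.1 ≤ 'Z' ∧ 'A' ≤ p.2 ∧ p.2 ≤ 'Z' then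
          PySem.Dict.modify d (String.ofList [p.1, p.2]) 0 (· + 1) else d),
      PySem.List.foldl_ite_eq_foldl_filter
        (p := fun p : Char × Char => 'A' ≤ p.1 ∧ p.1 ≤ 'Z' ∧ 'A' ≤ p.2 ∧ p.2 ≤ 'Z')
        (f := fun (d : PySem.Dict String Int) (p : Char × Char) =>
          PySem.Dict.modify d (String.ofList [p.1, p.2]) 0 (· + 1)),
      pvFoldMk, PySem.Dict.counter_eq_foldl]

-- ===== VERDICT (by name: the statement is the Claim_ definition above) =====
theorem gen_wrd_dic_spec : Claim_equal_gen_wrd_dic := by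
  intro str _
  unfold Spec_gen_wrd_dic gen_wrd_dic gen_wrd_dic_alt
  simp only [pvMain, PySem.Dict.items_counter, PySem.List.dedup_eq_ofList,
    PySem.List.count_eq]
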